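-- pv_equiv track=rewrite | github.com/tpm39/SAL-16 | Tools/Compiler/Tokenizer.py | getKeywordIdentifier
-- ===== SOURCE A (Python) =====
-- def getKeywordIdentifier(line):
--     val = ''
--     for i in range(len(line)):
--         if validKeywordIdentChar(line[i]):
--             val += line[i]
--         else:
--             return val
--     return val
--
-- def validKeywordIdentChar(char):
--     if char == '_' or                    \
--        (char >= 'a' and char <= 'z') or  \
--        (char >= 'A' and char <= 'Z') or  \
--        (char >= '0' and char <= '9'):
--         return True
--     else:
--         return False
-- ===== SOURCE B (Python) =====
-- import re
--
-- _IDENT = re.compile(r'[A-Za-z0-9_]*')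
--
-- def getKeywordIdentifier(line):
--     return _IDENT.match(line).group(0)
-- ===== Notes on version B (the rewrite author's own statement) =====
-- stated objective: idiomatic
-- what changed: Replaces the explicit index loop, per-character validity helper and string accumulator with a single anchored regex match [A-Za-z0-9_]* whose greedy prefix match is exactly the longest valid prefix.
import Mathlib
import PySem

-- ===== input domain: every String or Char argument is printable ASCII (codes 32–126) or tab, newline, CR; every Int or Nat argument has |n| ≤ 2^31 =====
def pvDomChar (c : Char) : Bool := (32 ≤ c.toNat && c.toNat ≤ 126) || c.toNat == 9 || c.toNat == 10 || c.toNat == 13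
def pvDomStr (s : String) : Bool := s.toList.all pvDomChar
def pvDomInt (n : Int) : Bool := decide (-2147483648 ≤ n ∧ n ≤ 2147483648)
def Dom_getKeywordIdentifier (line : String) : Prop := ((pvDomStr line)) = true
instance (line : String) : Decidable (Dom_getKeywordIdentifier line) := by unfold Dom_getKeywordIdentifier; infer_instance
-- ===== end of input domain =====

-- B replaces A's index loop + per-character helper + string accumulator with an anchored
-- greedy regex match [A-Za-z0-9_]* (ported as takeWhile over the character class); idiomatic.

-- ===== PORT A =====
-- helper: validKeywordIdentChar, branches in A's order
def validKeywordIdentChar (char : Char) : Bool :=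
  if char == '_' || ('a' ≤ char && char ≤ 'z') || ('A' ≤ char && char ≤ 'Z')
     || ('0' ≤ char && char ≤ '9') then true else false

-- the for-loop over range(len(line)) with early return, as structural recursion over the chars
def getKeywordIdentifierGo (cs : List Char) (val : List Char) : List Char :=
  match cs with
  | [] => val
  | c :: rest => if validKeywordIdentChar c then getKeywordIdentifierGo rest (val ++ [c]) else val

def getKeywordIdentifier (line : String) : String :=
  String.mk (getKeywordIdentifierGo line.toList [])

-- ===== PORT B =====
-- the regex character class [A-Za-z0-9_], ranges in the pattern's order
def identClassChar (c : Char) : Bool :=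
  ('A' ≤ c && c ≤ 'Z') || ('a' ≤ c && c ≤ 'z') || ('0' ≤ c && c ≤ '9') || c == '_'

-- re.match(r'[A-Za-z0-9_]*', line).group(0): greedy anchored prefix = takeWhile
def getKeywordIdentifier_alt (line : String) : String :=
  String.mk (line.toList.takeWhile identClassChar)

-- ===== PRECONDITION & SPEC =====
def Spec_getKeywordIdentifier (line : String) (out : String) : Prop := out = getKeywordIdentifier_alt line
instance (line : String) (out : String) : Decidable (Spec_getKeywordIdentifier line out) := by unfold Spec_getKeywordIdentifier; infer_instance

-- ===== CLAIM (what is proved, stated in full; the proofs are below) =====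
def Claim_equal_getKeywordIdentifier : Prop := ∀ (line : String), Dom_getKeywordIdentifier line → Spec_getKeywordIdentifier line (getKeywordIdentifier line)

-- ===== LEMMAS AND PROOFS =====

theorem validKeywordIdentChar_eq (c : Char) : validKeywordIdentChar c = identClassChar c := by
  rw [Bool.eq_iff_iff]
  simp [validKeywordIdentChar, identClassChar]
  tauto

theorem getKeywordIdentifierGo_eq (cs : List Char) (val : List Char) :
    getKeywordIdentifierGo cs val = val ++ cs.takeWhile identClassChar := by
  induction cs generalizing val with
  | nil => simp [getKeywordIdentifierGo]
  | cons c rest ih =>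
    simp only [getKeywordIdentifierGo, validKeywordIdentChar_eq, List.takeWhile]
    cases h : identClassChar c with
    | true => simp [ih]
    | false => simp

-- ===== VERDICT (by name: the statement is the Claim_ definition above) =====
theorem getKeywordIdentifier_spec : Claim_equal_getKeywordIdentifier := by
  intro line _
  unfold Spec_getKeywordIdentifier getKeywordIdentifier getKeywordIdentifier_alt
  rw [getKeywordIdentifierGo_eq]
  simp
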